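-- pv_equiv track=rewrite | github.com/rajvirbhimwal/Python_Assignment | Assignment_2/Assignment_2.py | assign_grades
-- ===== SOURCE A (Python) =====
-- def assign_grades(marks):
--     grades = {}
--     for name, mark in marks.items():
--         if mark >= 90:
--             grades[name] = "A"
--         elif mark >= 80:
--             grades[name] = "B"
--         elif mark >= 70:
--             grades[name] = "C"
--         elif mark >= 60:
--             grades[name] = "D"
--         else:
--             grades[name] = "F"
--     return grades
-- ===== SOURCE B (Python) =====
-- import bisect
--
-- _THRESHOLDS = [60, 70, 80, 90]
-- _LABELS = ["F", "D", "C", "B", "A"]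
--
-- def assign_grades(marks):
--     return {name: _LABELS[bisect.bisect_right(_THRESHOLDS, mark)]
--             for name, mark in marks.items()}
-- ===== Notes on version B (the rewrite author's own statement) =====
-- stated objective: idiomatic
-- what changed: Replaces the if-elif comparison cascade with a threshold table looked up by binary search (bisect_right) inside a dict comprehension.
import Mathlib
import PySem

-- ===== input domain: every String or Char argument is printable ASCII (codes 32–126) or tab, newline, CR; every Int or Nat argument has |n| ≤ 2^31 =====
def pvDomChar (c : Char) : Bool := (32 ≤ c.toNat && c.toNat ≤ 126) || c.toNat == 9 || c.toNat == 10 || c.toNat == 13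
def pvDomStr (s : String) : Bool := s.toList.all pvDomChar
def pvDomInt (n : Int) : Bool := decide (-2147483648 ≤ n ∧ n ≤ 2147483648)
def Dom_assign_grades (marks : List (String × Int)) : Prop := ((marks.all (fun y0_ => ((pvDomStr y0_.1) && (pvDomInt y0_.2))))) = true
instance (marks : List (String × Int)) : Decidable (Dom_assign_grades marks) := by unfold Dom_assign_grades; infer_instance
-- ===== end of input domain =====

-- B replaces A's if-elif cascade with a threshold table looked up by bisect_right (idiomatic; same cost).

-- ===== PORT A =====
-- literal port: build the grades dict entry by entry with the comparison cascade, return it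
def assign_grades (marks : List (String × Int)) : List (String × String) :=
  (marks.foldl (fun grades p =>
      if p.2 ≥ 90 then grades.insert p.1 "A"
      else if p.2 ≥ 80 then grades.insert p.1 "B"
      else if p.2 ≥ 70 then grades.insert p.1 "C"
      else if p.2 ≥ 60 then grades.insert p.1 "D"
      else grades.insert p.1 "F")
    (PySem.Dict.empty : PySem.Dict String String)).items

-- ===== PORT B =====
def gradesThresholds : List Int := [60, 70, 80, 90]
def gradesLabels : List String := ["F", "D", "C", "B", "A"]

-- port of Source B's dict comprehension; _LABELS[bisect_right(...)]: the index is always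
-- 0..4 < 5, so List.getD is exact for Python's list indexing here
def assign_grades_alt (marks : List (String × Int)) : List (String × String) :=
  (marks.foldl (fun d p =>
      d.insert p.1 (gradesLabels.getD (PySem.List.bisectRight gradesThresholds p.2) ""))
    (PySem.Dict.empty : PySem.Dict String String)).items

-- ===== PRECONDITION & SPEC =====
def Spec_assign_grades (marks : List (String × Int)) (out : List (String × String)) : Prop := out = assign_grades_alt marks
instance (marks : List (String × Int)) (out : List (String × String)) : Decidable (Spec_assign_grades marks out) := by unfold Spec_assign_grades; infer_instance

-- ===== CLAIM (what is proved, stated in full; the proofs are below) =====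
def Claim_equal_assign_grades : Prop := ∀ (marks : List (String × Int)), Dom_assign_grades marks → Spec_assign_grades marks (assign_grades marks)

-- ===== LEMMAS AND PROOFS =====

-- the table lookup computes exactly the cascade's grade
lemma grade_eq (m : Int) :
    gradesLabels.getD (PySem.List.bisectRight gradesThresholds m) "" =
      (if m ≥ 90 then "A" else if m ≥ 80 then "B" else if m ≥ 70 then "C"
       else if m ≥ 60 then "D" else "F") := by
  have hspec := PySem.List.bisectRight_spec gradesThresholds m (by decide)
  revert hspec
  generalize PySem.List.bisectRight gradesThresholds m = k
  rintro ⟨h1, h2, h3⟩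
  simp only [gradesThresholds, List.length_cons, List.length_nil] at h1
  have e0 := h2 0 (by simp [gradesThresholds]); have e1 := h2 1 (by simp [gradesThresholds])
  have e2 := h2 2 (by simp [gradesThresholds]); have e3 := h2 3 (by simp [gradesThresholds])
  have f0 := h3 0 (by simp [gradesThresholds]); have f1 := h3 1 (by simp [gradesThresholds])
  have f2 := h3 2 (by simp [gradesThresholds]); have f3 := h3 3 (by simp [gradesThresholds])
  simp only [gradesThresholds, List.getElem_cons_zero, List.getElem_cons_succ] at e0 e1 e2 e3 f0 f1 f2 f3
  interval_cases k <;> split_ifs <;> first | rfl | omega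

-- ===== VERDICT (by name: the statement is the Claim_ definition above) =====
lemma fold_eq (marks : List (String × Int)) (d : PySem.Dict String String) :
    marks.foldl (fun grades p =>
      if p.2 ≥ 90 then grades.insert p.1 "A"
      else if p.2 ≥ 80 then grades.insert p.1 "B"
      else if p.2 ≥ 70 then grades.insert p.1 "C"
      else if p.2 ≥ 60 then grades.insert p.1 "D"
      else grades.insert p.1 "F") d =
    marks.foldl (fun d p =>
      d.insert p.1 (gradesLabels.getD (PySem.List.bisectRight gradesThresholds p.2) "")) d := by
  induction marks generalizing d with
  | nil => rfl
  | cons p rest ih =>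
      simp only [List.foldl_cons]
      rw [grade_eq p.2]
      split_ifs <;> exact ih _

theorem assign_grades_spec : Claim_equal_assign_grades := by
  intro marks _
  unfold Spec_assign_grades assign_grades assign_grades_alt
  rw [fold_eq]
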